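-- pv_equiv track=rewrite | github.com/Erictan24/cryptovision-bot | test_scalp_fase2.py | filter_config
-- ===== SOURCE A (Python) =====
-- def filter_config(records, allow_sources):
--     """Priority SCALP > CHART > MOMENTUM."""
--     by_candle = {}
--     for coin, i, src, sig in records:
--         if src not in allow_sources:
--             continue
--         key = (coin, i)
--         prio = {'SCALP': 3, 'CHART': 2, 'MOMENTUM': 1}[src]
--         existing = by_candle.get(key)
--         if existing is None or prio > existing[0]:
--             by_candle[key] = (prio, src, sig)
--
--     flat = []
--     for (coin, i), (_, src, sig) in by_candle.items():
--         flat.append((coin, i, src, sig))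
--     flat.sort(key=lambda x: (x[0], x[1]))
--
--     # Dedup per coin+direction dalam 4 jam (16 × 15m candle)
--     last = {}
--     dedup = []
--     for coin, i, src, sig in flat:
--         k = (coin, sig['direction'])
--         if k in last:
--             if i - last[k] < 16:  # 4 jam
--                 continue
--         last[k] = i
--         dedup.append((coin, i, src, sig))
--     return dedup
-- ===== SOURCE B (Python) =====
-- # Alternative decomposition: collect the distinct (coin, i) keys once, sort the keys,
-- # then pick each candle's best record by a direct scan; same temporal dedup pass.
-- def filter_config(records, allow_sources):
--     """Priority SCALP > CHART > MOMENTUM."""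
--     PRIO = {'SCALP': 3, 'CHART': 2, 'MOMENTUM': 1}
--     allowed = [r for r in records if r[2] in allow_sources]
--
--     keys = []
--     seen = set()
--     for coin, i, src, sig in allowed:
--         if (coin, i) not in seen:
--             seen.add((coin, i))
--             keys.append((coin, i))
--     keys.sort()
--
--     last = {}
--     out = []
--     for coin, i in keys:
--         best = None
--         for c2, i2, src2, sig2 in allowed:
--             if c2 == coin and i2 == i and (best is None or PRIO[src2] > best[0]):
--                 best = (PRIO[src2], src2, sig2)
--         _, src, sig = best
--         k = (coin, sig['direction'])
--         if k not in last or i - last[k] >= 16: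
--             last[k] = i
--             out.append((coin, i, src, sig))
--     return out
-- ===== Notes on version B (the rewrite author's own statement) =====
-- stated objective: alternative
-- what changed: Replaces the insertion-order dict aggregation followed by a sort of the flattened records with: sort the distinct (coin, i) keys once, then select each candle's best-priority record by a direct first-wins scan of the allowed records, feeding the temporal dedup pass.
import Mathlib
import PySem

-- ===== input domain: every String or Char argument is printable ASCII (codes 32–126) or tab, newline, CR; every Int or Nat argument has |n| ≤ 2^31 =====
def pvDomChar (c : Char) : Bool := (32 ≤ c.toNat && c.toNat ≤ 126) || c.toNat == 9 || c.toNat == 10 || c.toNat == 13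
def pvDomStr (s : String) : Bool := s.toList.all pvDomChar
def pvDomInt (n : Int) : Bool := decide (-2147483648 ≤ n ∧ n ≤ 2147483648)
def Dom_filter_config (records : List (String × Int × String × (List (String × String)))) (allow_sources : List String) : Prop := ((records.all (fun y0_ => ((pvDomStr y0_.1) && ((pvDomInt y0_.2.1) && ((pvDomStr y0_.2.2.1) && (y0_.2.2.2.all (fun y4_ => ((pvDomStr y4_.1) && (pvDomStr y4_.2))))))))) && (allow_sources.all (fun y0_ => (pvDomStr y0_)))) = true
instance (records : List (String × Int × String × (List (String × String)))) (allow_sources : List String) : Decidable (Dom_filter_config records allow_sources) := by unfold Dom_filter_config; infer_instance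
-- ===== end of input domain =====

-- B replaces A's insertion-order dict aggregation + sort of the flattened records by sorting the
-- distinct (coin, i) keys once and picking each candle's best-priority record by a direct
-- first-wins scan; same temporal dedup pass. Objective: alternative decomposition (not faster).

abbrev PvSig := List (String × String)
abbrev PvRec := String × Int × String × PvSig
abbrev PvVal := Int × String × PvSig

-- ===== PORT A =====

-- {'SCALP': 3, 'CHART': 2, 'MOMENTUM': 1}
def pvPrioTable : PySem.Dict String Int :=
  PySem.Dict.ofList [("SCALP", 3), ("CHART", 2), ("MOMENTUM", 1)]

-- sig['direction'] (first-match association-list lookup; a missing key is a KeyError, excluded by Pre_)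
def pvDirection (sig : PvSig) : String := PySem.Dict.getD (PySem.Dict.mk sig) "direction" ""

def filter_config (records : List (String × Int × String × (List (String × String)))) (allow_sources : List String) : List (String × Int × String × (List (String × String))) :=
  -- first loop: by_candle dict keyed by (coin, i)
  let by_candle : PySem.Dict (String × Int) PvVal :=
    records.foldl (fun d r =>
      if r.2.2.1 ∈ allow_sources then
        -- prio = {'SCALP':3,'CHART':2,'MOMENTUM':1}[src]; KeyError excluded by Pre_
        let prio := PySem.Dict.getD pvPrioTable r.2.2.1 0
        match PySem.Dict.get? d (r.1, r.2.1) with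
        | none => PySem.Dict.insert d (r.1, r.2.1) (prio, r.2.2.1, r.2.2.2)
        | some existing =>
            if prio > existing.1 then PySem.Dict.insert d (r.1, r.2.1) (prio, r.2.2.1, r.2.2.2)
            else d
      else d) PySem.Dict.empty
  -- second loop: flatten the items, then flat.sort(key=lambda x: (x[0], x[1]))
  let flat : List PvRec :=
    by_candle.items.foldl (fun acc kv => acc ++ [(kv.1.1, kv.1.2, kv.2.2.1, kv.2.2.2)]) []
  let flatS := PySem.List.sorted flat (fun x => toLex (x.1, x.2.1)) false
  -- third loop: temporal dedup per (coin, direction)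
  (flatS.foldl (fun st r =>
      let k := (r.1, pvDirection r.2.2.2)
      if st.1.contains k ∧ r.2.1 - PySem.Dict.getD st.1 k 0 < 16 then st
      else (st.1.insert k r.2.1, st.2 ++ [r])) ((PySem.Dict.empty : PySem.Dict (String × String) Int), ([] : List PvRec))).2

-- ===== PORT B =====

def pvBBest (allowed : List PvRec) (k : String × Int) : Option PvVal :=
  allowed.foldl (fun b r =>
    match b with
    | none =>
        if r.1 = k.1 ∧ r.2.1 = k.2 then
          some (PySem.Dict.getD pvPrioTable r.2.2.1 0, r.2.2.1, r.2.2.2)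
        else none
    | some ex =>
        if r.1 = k.1 ∧ r.2.1 = k.2 ∧ PySem.Dict.getD pvPrioTable r.2.2.1 0 > ex.1 then
          some (PySem.Dict.getD pvPrioTable r.2.2.1 0, r.2.2.1, r.2.2.2)
        else some ex) none

def filter_config_alt (records : List (String × Int × String × (List (String × String)))) (allow_sources : List String) : List (String × Int × String × (List (String × String))) :=
  let allowed := records.filter (fun r => decide (r.2.2.1 ∈ allow_sources))
  -- distinct (coin, i) keys in first-occurrence order (keys/seen loop), then keys.sort()
  let keys : PySem.Set (String × Int) :=
    allowed.foldl (fun ks r => PySem.Set.add ks (r.1, r.2.1)) PySem.Set.empty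
  let keysS := PySem.List.sorted keys (fun k => toLex k) false
  (keysS.foldl (fun st k =>
      -- inner scan: best = first record of this candle with maximal priority
      let best : Option PvVal := pvBBest allowed k
      match best with
      | none => st   -- unreachable: every key comes from some allowed record
      | some v =>
          let kk := (k.1, pvDirection v.2.2)
          if ¬ st.1.contains kk ∨ k.2 - PySem.Dict.getD st.1 kk 0 ≥ 16 then
            (st.1.insert kk k.2, st.2 ++ [(k.1, k.2, v.2.1, v.2.2)])
          else st) ((PySem.Dict.empty : PySem.Dict (String × String) Int), ([] : List PvRec))).2

-- ===== PRECONDITION & SPEC =====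
-- Pre_ excludes inputs where some record allowed by allow_sources has a src outside the three
-- priority names or a sig without a 'direction' key: on those A raises KeyError, except when such a
-- record is shadowed by a higher-priority record of the same candle, where A and B still agree.
def Pre_filter_config (records : List (String × Int × String × (List (String × String)))) (allow_sources : List String) : Prop :=
  ∀ r ∈ records, r.2.2.1 ∈ allow_sources →
    (r.2.2.1 = "SCALP" ∨ r.2.2.1 = "CHART" ∨ r.2.2.1 = "MOMENTUM") ∧
    "direction" ∈ r.2.2.2.map (·.1)
instance (records : List (String × Int × String × (List (String × String)))) (allow_sources : List String) : Decidable (Pre_filter_config records allow_sources) := by unfold Pre_filter_config; infer_instance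

def pvWitness_filter_config : (List (String × Int × String × (List (String × String)))) × List String :=
  ([("BTC", 7, "SCALP", [("direction", "LONG")])], ["SCALP"])

def Spec_filter_config (records : List (String × Int × String × (List (String × String)))) (allow_sources : List String) (out : List (String × Int × String × (List (String × String)))) : Prop := out = filter_config_alt records allow_sources
instance (records : List (String × Int × String × (List (String × String)))) (allow_sources : List String) (out : List (String × Int × String × (List (String × String)))) : Decidable (Spec_filter_config records allow_sources out) := by unfold Spec_filter_config; infer_instance

-- ===== CLAIM (what is proved, stated in full; the proofs are below) =====
def Claim_equal_filter_config : Prop := ∀ (records : List (String × Int × String × (List (String × String)))) (allow_sources : List String), Dom_filter_config records allow_sources → Pre_filter_config records allow_sources → Spec_filter_config records allow_sources (filter_config records allow_sources)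

-- ===== LEMMAS AND PROOFS =====

-- proof-side helpers: a canonical form both ports are reduced to
def pvKey (r : PvRec) : String × Int := (r.1, r.2.1)
def pvDummy : PvVal := (0, "", [])
def pvMkVal (r : PvRec) : PvVal := (PySem.Dict.getD pvPrioTable r.2.2.1 0, r.2.2.1, r.2.2.2)

def pvStep (b : Option PvVal) (r : PvRec) : Option PvVal :=
  match b with
  | none => some (pvMkVal r)
  | some ex =>
      if PySem.Dict.getD pvPrioTable r.2.2.1 0 > ex.1 then some (pvMkVal r) else some ex

def pvStepA (d : PySem.Dict (String × Int) PvVal) (r : PvRec) : PySem.Dict (String × Int) PvVal :=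
  match PySem.Dict.get? d (r.1, r.2.1) with
  | none => PySem.Dict.insert d (r.1, r.2.1) (pvMkVal r)
  | some existing =>
      if PySem.Dict.getD pvPrioTable r.2.2.1 0 > existing.1 then
        PySem.Dict.insert d (r.1, r.2.1) (pvMkVal r)
      else d

def pvStepA' (d : PySem.Dict (String × Int) PvVal) (r : PvRec) : PySem.Dict (String × Int) PvVal :=
  PySem.Dict.insert d (pvKey r) ((pvStep (PySem.Dict.get? d (pvKey r)) r).getD pvDummy)

def pvFilt (records : List PvRec) (allow_sources : List String) : List PvRec :=
  records.filter (fun r => decide (r.2.2.1 ∈ allow_sources))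

def pvGroup (l : List PvRec) (k : String × Int) : List PvRec :=
  l.filter (fun r => decide (pvKey r = k))

def pvBestD (l : List PvRec) (k : String × Int) : PvVal :=
  ((pvGroup l k).foldl pvStep none).getD pvDummy

def pvMk4 (k : String × Int) (v : PvVal) : PvRec := (k.1, k.2, v.2.1, v.2.2)

def pvDedupStep (st : PySem.Dict (String × String) Int × List PvRec) (r : PvRec) :
    PySem.Dict (String × String) Int × List PvRec :=
  let k := (r.1, pvDirection r.2.2.2)
  if st.1.contains k ∧ r.2.1 - PySem.Dict.getD st.1 k 0 < 16 then st
  else (st.1.insert k r.2.1, st.2 ++ [r])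

def pvCanon (records : List PvRec) (allow_sources : List String) : List PvRec :=
  let filt := pvFilt records allow_sources
  let keysS := PySem.List.sorted (PySem.Set.ofList (filt.map pvKey)) (fun k => toLex k) false
  (keysS.foldl (fun st k => pvDedupStep st (pvMk4 k (pvBestD filt k)))
    ((PySem.Dict.empty : PySem.Dict (String × String) Int), ([] : List PvRec))).2

theorem pvStep_eq_some (b : Option PvVal) (r : PvRec) :
    pvStep b r = some ((pvStep b r).getD pvDummy) := by
  cases b with
  | none => rfl
  | some ex =>
      simp only [pvStep]
      split <;> rfl

theorem pvFoldl_pvStep_isSome (l : List PvRec) (b : Option PvVal) (hb : b.isSome) :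
    (l.foldl pvStep b).isSome := by
  induction l generalizing b with
  | nil => simpa using hb
  | cons r t ih =>
      rw [List.foldl_cons]
      exact ih _ (by rw [pvStep_eq_some]; rfl)

theorem pvBest_isSome (l : List PvRec) (h : l ≠ []) : (l.foldl pvStep none).isSome := by
  cases l with
  | nil => exact absurd rfl h
  | cons r t =>
      rw [List.foldl_cons]
      exact pvFoldl_pvStep_isSome _ _ (by rw [pvStep_eq_some]; rfl)

theorem pvInsert_self_eq (d : PySem.Dict (String × Int) PvVal) (k : String × Int) (v : PvVal)
    (hnd : d.keys.Nodup) (hget : d.get? k = some v) : d.insert k v = d := by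
  apply PySem.Dict.ext
  rw [PySem.Dict.items_insert_of_contains _ _ (by rw [PySem.Dict.contains_eq_isSome_get?, hget]; rfl)]
  rw [show d.items.map (fun p => if (p.1 == k) = true then (k, v) else p) = d.items.map id from ?_,
     List.map_id]
  apply List.map_congr_left
  intro p hp
  by_cases hk : p.1 = k
  · have : d.get? p.1 = some p.2 := PySem.Dict.get?_of_mem_items d (by simpa using hp) hnd
    rw [hk, hget] at this
    rw [hk, Option.some_inj.mp this, ← hk]
    simp
  · simp [hk]

theorem pvStepA_eq (d : PySem.Dict (String × Int) PvVal) (r : PvRec) (hnd : d.keys.Nodup) :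
    pvStepA d r = pvStepA' d r := by
  unfold pvStepA pvStepA' pvKey
  cases hget : PySem.Dict.get? d (r.1, r.2.1) with
  | none => simp [pvStep]
  | some ex =>
      simp only [pvStep]
      split
      · simp
      · simpa using (pvInsert_self_eq d (r.1, r.2.1) ex hnd hget).symm

theorem pvFoldl_stepA_eq (l : List PvRec) (d : PySem.Dict (String × Int) PvVal)
    (hnd : d.keys.Nodup) : l.foldl pvStepA d = l.foldl pvStepA' d := by
  induction l generalizing d with
  | nil => rfl
  | cons r t ih =>
      rw [List.foldl_cons, List.foldl_cons, pvStepA_eq d r hnd]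
      exact ih _ (PySem.Dict.nodup_keys_insert _ _ _ hnd)

theorem pvGet_foldl_stepA' (l : List PvRec) (d : PySem.Dict (String × Int) PvVal)
    (k : String × Int) :
    (l.foldl pvStepA' d).get? k = (pvGroup l k).foldl pvStep (d.get? k) := by
  induction l generalizing d with
  | nil => simp [pvGroup]
  | cons r t ih =>
      rw [List.foldl_cons, ih]
      by_cases hk : pvKey r = k
      · have h1 : (pvStepA' d r).get? k = pvStep (d.get? k) r := by
          unfold pvStepA'
          rw [PySem.Dict.get?_insert, if_pos hk.symm, hk, ← pvStep_eq_some]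
        rw [h1]
        have h2 : pvGroup (r :: t) k = r :: pvGroup t k := by
          simp [pvGroup, hk]
        rw [h2, List.foldl_cons]
      · have h1 : (pvStepA' d r).get? k = d.get? k := by
          unfold pvStepA'
          rw [PySem.Dict.get?_insert, if_neg (fun h => hk h.symm)]
        have h2 : pvGroup (r :: t) k = pvGroup t k := by
          simp [pvGroup, hk]
        rw [h1, h2]

theorem pvKeys_foldl_stepA' (l : List PvRec) :
    (l.foldl pvStepA' PySem.Dict.empty).keys = PySem.Set.ofList (l.map pvKey) := by
  rw [show pvStepA' = (fun (d : PySem.Dict (String × Int) PvVal) r =>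
        d.insert (pvKey r) ((pvStep (PySem.Dict.get? d (pvKey r)) r).getD pvDummy)) from rfl]
  rw [PySem.Dict.keys_foldl_insert_key l pvKey
        (fun d r => (pvStep (PySem.Dict.get? d (pvKey r)) r).getD pvDummy) PySem.Dict.empty]
  rw [PySem.Dict.keys_empty, PySem.Set.ofList_eq_foldl]
  rfl

theorem pvNodup_keys_foldl_stepA' (l : List PvRec) :
    (l.foldl pvStepA' PySem.Dict.empty).keys.Nodup := by
  rw [show pvStepA' = (fun (d : PySem.Dict (String × Int) PvVal) r =>
        d.insert (pvKey r) ((pvStep (PySem.Dict.get? d (pvKey r)) r).getD pvDummy)) from rfl]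
  exact PySem.Dict.nodup_keys_foldl_insert_key l pvKey
    (fun d r => (pvStep (PySem.Dict.get? d (pvKey r)) r).getD pvDummy) PySem.Dict.empty
    (by rw [PySem.Dict.keys_empty]; exact List.nodup_nil)

-- A's by_candle dict flattened is exactly one best record per distinct key
theorem pvFlat_eq (l : List PvRec) :
    (l.foldl pvStepA' PySem.Dict.empty).items.foldl
        (fun acc kv => acc ++ [(kv.1.1, kv.1.2, kv.2.2.1, kv.2.2.2)]) []
      = (PySem.Set.ofList (l.map pvKey)).map (fun k => pvMk4 k (pvBestD l k)) := by
  rw [PySem.List.foldl_append_singleton_eq_map (fun kv : (String × Int) × PvVal =>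
        (kv.1.1, kv.1.2, kv.2.2.1, kv.2.2.2)), List.nil_append]
  rw [PySem.Dict.items_eq_map_keys _ (pvNodup_keys_foldl_stepA' l) pvDummy]
  rw [pvKeys_foldl_stepA' l, List.map_map]
  apply List.map_congr_left
  intro k _
  have hval : (List.foldl pvStepA' PySem.Dict.empty l).getD k pvDummy = pvBestD l k := by
    rw [PySem.Dict.getD_eq_get?_getD, pvGet_foldl_stepA', PySem.Dict.get?_empty]
    rfl
  simp [Function.comp, hval, pvMk4]

theorem pvSorted_flat_eq (l : List PvRec) :
    PySem.List.sorted ((PySem.Set.ofList (l.map pvKey)).map (fun k => pvMk4 k (pvBestD l k)))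
        (fun x => toLex (x.1, x.2.1)) false
      = (PySem.List.sorted (PySem.Set.ofList (l.map pvKey)) (fun k => toLex k) false).map
          (fun k => pvMk4 k (pvBestD l k)) := by
  apply PySem.List.sorted_eq_of_perm_of_pairwise_lt
  · exact (PySem.List.sorted_perm _ _ _).map _
  · rw [List.pairwise_map]
    have hle := PySem.List.sorted_pairwise (PySem.Set.ofList (l.map pvKey)) (fun k => toLex k)
    have hnd : (PySem.List.sorted (PySem.Set.ofList (l.map pvKey)) (fun k => toLex k) false).Nodup :=
      ((PySem.List.sorted_perm _ _ _).nodup_iff).mpr (PySem.Set.nodup_ofList _)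
    refine (hle.and hnd).imp ?_
    rintro a b ⟨h1, h2⟩
    simp only [pvMk4]
    have : toLex a < toLex b := lt_of_le_of_ne h1 (fun he => h2 (by simpa using he))
    simpa using this

theorem pvA_eq_canon (records : List PvRec) (allow_sources : List String) :
    filter_config records allow_sources = pvCanon records allow_sources := by
  show ((PySem.List.sorted
      ((List.foldl (fun d r => if r.2.2.1 ∈ allow_sources then pvStepA d r else d)
          PySem.Dict.empty records).items.foldl
        (fun acc kv => acc ++ [(kv.1.1, kv.1.2, kv.2.2.1, kv.2.2.2)]) [])
      (fun x => toLex (x.1, x.2.1)) false).foldl pvDedupStep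
      ((PySem.Dict.empty : PySem.Dict (String × String) Int), ([] : List PvRec))).2
    = pvCanon records allow_sources
  rw [PySem.List.foldl_ite_eq_foldl_filter (p := fun r : PvRec => r.2.2.1 ∈ allow_sources)
        (f := pvStepA)]
  rw [pvFoldl_stepA_eq _ _ (by rw [PySem.Dict.keys_empty]; exact List.nodup_nil)]
  rw [pvFlat_eq, pvSorted_flat_eq, List.foldl_map]
  rfl

-- B's inner scan computes the same best record
theorem pvInner_eq (l : List PvRec) (k : String × Int) :
    pvBBest l k = (pvGroup l k).foldl pvStep none := by
  unfold pvBBest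
  have hfun : (fun (b : Option PvVal) (r : PvRec) =>
      match b with
      | none =>
          if r.1 = k.1 ∧ r.2.1 = k.2 then
            some (PySem.Dict.getD pvPrioTable r.2.2.1 0, r.2.2.1, r.2.2.2)
          else none
      | some ex =>
          if r.1 = k.1 ∧ r.2.1 = k.2 ∧ PySem.Dict.getD pvPrioTable r.2.2.1 0 > ex.1 then
            some (PySem.Dict.getD pvPrioTable r.2.2.1 0, r.2.2.1, r.2.2.2)
          else some ex)
      = (fun b r => if pvKey r = k then pvStep b r else b) := by
    funext b r
    have hiff : pvKey r = k ↔ (r.1 = k.1 ∧ r.2.1 = k.2) := by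
      unfold pvKey
      cases k
      simp [Prod.ext_iff]
    cases b with
    | none =>
        show (if r.1 = k.1 ∧ r.2.1 = k.2 then _ else _) = _
        by_cases h : pvKey r = k
        · rw [if_pos (hiff.mp h), if_pos h]
          rfl
        · rw [if_neg (fun hc => h (hiff.mpr hc)), if_neg h]
    | some ex =>
        show (if r.1 = k.1 ∧ r.2.1 = k.2 ∧ _ then _ else _) = _
        by_cases h : pvKey r = k
        · obtain ⟨h1, h2⟩ := hiff.mp h
          by_cases hp : PySem.Dict.getD pvPrioTable r.2.2.1 0 > ex.1
          · rw [if_pos ⟨h1, h2, hp⟩, if_pos h]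
            simp [pvStep, pvMkVal, hp]
          · rw [if_neg (by tauto), if_pos h]
            simp [pvStep, pvMkVal, hp]
        · rw [if_neg (fun hc => h (hiff.mpr ⟨hc.1, hc.2.1⟩)), if_neg h]
  refine Eq.trans (congrArg (fun f => List.foldl f (none : Option PvVal) l) hfun) ?_
  show List.foldl (fun b r => if pvKey r = k then pvStep b r else b) none l
    = List.foldl pvStep none (pvGroup l k)
  rw [PySem.List.foldl_ite_eq_foldl_filter (p := fun r : PvRec => pvKey r = k) (f := pvStep)]
  rfl

theorem pvB_eq_canon (records : List PvRec) (allow_sources : List String) :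
    filter_config_alt records allow_sources = pvCanon records allow_sources := by
  have hkeys : ∀ (l : List PvRec),
      l.foldl (fun ks r => PySem.Set.add ks (r.1, r.2.1)) PySem.Set.empty
        = PySem.Set.ofList (l.map pvKey) := by
    intro l
    rw [PySem.Set.ofList_eq_foldl, List.foldl_map]
    rfl
  show ((PySem.List.sorted
      ((pvFilt records allow_sources).foldl (fun ks r => PySem.Set.add ks (r.1, r.2.1))
        PySem.Set.empty) (fun k => toLex k) false).foldl
      (fun st k =>
        match pvBBest (pvFilt records allow_sources) k with
        | none => st
        | some v =>
            if ¬ st.1.contains (k.1, pvDirection v.2.2) ∨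
                k.2 - PySem.Dict.getD st.1 (k.1, pvDirection v.2.2) 0 ≥ 16 then
              (st.1.insert (k.1, pvDirection v.2.2) k.2, st.2 ++ [(k.1, k.2, v.2.1, v.2.2)])
            else st)
      ((PySem.Dict.empty : PySem.Dict (String × String) Int), ([] : List PvRec))).2
    = pvCanon records allow_sources
  rw [hkeys]
  unfold pvCanon
  congr 1
  apply PySem.List.foldl_congr_mem
  intro st k hk
  have hk0 : k ∈ (pvFilt records allow_sources).map pvKey := by
    have := (PySem.List.sorted_perm (PySem.Set.ofList ((pvFilt records allow_sources).map pvKey))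
      (fun k => toLex k) false).mem_iff.mp hk
    exact (PySem.Set.mem_ofList _ _).mp this
  obtain ⟨r0, hr0, hr0k⟩ := List.mem_map.mp hk0
  have hne : pvGroup (pvFilt records allow_sources) k ≠ [] :=
    List.ne_nil_of_mem (List.mem_filter.mpr ⟨hr0, by simp [hr0k]⟩)
  obtain ⟨v, hv⟩ := Option.isSome_iff_exists.mp
    (pvBest_isSome (pvGroup (pvFilt records allow_sources) k) hne)
  rw [pvInner_eq, hv]
  have hval : pvBestD (pvFilt records allow_sources) k = v := by
    unfold pvBestD
    rw [hv]
    rfl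
  show (if ¬ st.1.contains (k.1, pvDirection v.2.2) ∨
        k.2 - PySem.Dict.getD st.1 (k.1, pvDirection v.2.2) 0 ≥ 16 then
      (st.1.insert (k.1, pvDirection v.2.2) k.2, st.2 ++ [(k.1, k.2, v.2.1, v.2.2)])
    else st) = pvDedupStep st (pvMk4 k (pvBestD (pvFilt records allow_sources) k))
  rw [hval]
  unfold pvDedupStep pvMk4
  by_cases hc : st.1.contains (k.1, pvDirection v.2.2) = true
  · by_cases hlt : k.2 - PySem.Dict.getD st.1 (k.1, pvDirection v.2.2) 0 < 16
    · rw [if_neg (by rintro (h | h); exact h hc; omega), if_pos ⟨hc, hlt⟩]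
    · rw [if_pos (Or.inr (by omega)), if_neg (by tauto)]
  · rw [if_pos (Or.inl hc), if_neg (by tauto)]


theorem filter_config_witness_ok :
    Dom_filter_config pvWitness_filter_config.1 pvWitness_filter_config.2 ∧
    Pre_filter_config pvWitness_filter_config.1 pvWitness_filter_config.2 := by decide


-- ===== VERDICT (by name: the statement is the Claim_ definition above) =====
theorem filter_config_spec : Claim_equal_filter_config := by
  intro records allow_sources _ _
  unfold Spec_filter_config
  rw [pvA_eq_canon, pvB_eq_canon]
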